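-- pv_equiv track=rewrite | github.com/matcom/cool-compiler-2020 | src/comments.py | find_comments
-- ===== SOURCE A (Python) =====
-- def find_comments(program: str) -> str:
--     '''
--     This functions detects every comment in a Cool program\
--     and replace it with empty lines. This is done in a way\
--     so is posible for the other components of the\
--     compiler to correctly detect errors on exact Line and\
--     Column.\
--     In Cool a comment can be of the form (*...*) or -- ending\
--     with a newline. Comments can be nested, so there is no regular\
--     expression to detect them.
--     '''
--     pairs = []
--     stack = []
--     line = 1
--     column = 1
--     program = list(program)
--     iter_char = iter(enumerate(program))
--     while 1:
--         try:
--             i, char = next(iter_char)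
--             column += 1
--             if char == '\n':
--                 line += 1
--                 column = 1
--             elif char == '(':
--                 i, char = next(iter_char)
--                 column += 1
--                 if char == '*':
--                     stack.append(i - 1)
--                 elif char == '\n':
--                     line += 1
--                     column = 1
--             elif char == '*':
--                 i, char = next(iter_char)
--                 column += 1
--                 if char == ')':
--                     first = stack.pop()
--                     pairs.append((first, i))
--                 elif char == '\n':
--                     line += 1
--                     column = 1
--         except StopIteration:
--             break
--     assert not stack, "(%d, %d) - LexicographicError: EOF in comment" % (
--         line, column)
--     iter_char = iter(enumerate(program))
--     column = 1
--     line = 1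
--     while 1:
--         try:
--             i, char = next(iter_char)
--             column += 1
--             if char == '-':
--                 i, char = next(iter_char)
--                 column += 1
--                 if char == '-':
--                     stack.append(i - 1)
--                 elif char == '\n':
--                     if stack:
--                         first = stack.pop()
--                         pairs.append((first, i))
--                     column = 1
--                     line += 1
--             elif char == '\n':
--                 if stack:
--                     first = stack.pop()
--                     pairs.append((first, i))
--                 column = 1
--                 line += 1
--         except StopIteration:
--             break
--     while pairs:
--         i, j = pairs.pop()
--         for k in range(i, j + 1):
--             if not program[k] == '\n':
--                 program[k] = ' '
--     return ''.join(program)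
-- ===== SOURCE B (Python) =====
-- def find_comments(program: str) -> str:
--     '''Blank out Cool comments ((*...*), possibly nested, and -- to end of line)
--     with spaces, keeping newlines so line/column positions are preserved.
--     Marks every comment interval in a coverage difference array and blanks the
--     characters in one final sweep instead of re-filling overlapping intervals.'''
--     chars = list(program)
--     n = len(chars)
--     diff = [0] * (n + 1)
--
--     def cover(a, b):            # mark [a, b) as comment
--         diff[a] += 1
--         diff[b] -= 1
--
--     # pass 1: (* ... *) block comments, scanning two characters at a time
--     stack = []
--     i = 0
--     while i < n:
--         if chars[i] == '(':
--             if i + 1 < n and chars[i + 1] == '*':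
--                 stack.append(i)
--             i += 2
--         elif chars[i] == '*':
--             if i + 1 < n and chars[i + 1] == ')' and stack:
--                 cover(stack.pop(), i + 2)
--             i += 2
--         else:
--             i += 1
--
--     # pass 2: -- ... end-of-line comments
--     stack = []
--     i = 0
--     while i < n:
--         if chars[i] == '-':
--             if i + 1 < n:
--                 if chars[i + 1] == '-':
--                     stack.append(i)
--                 elif chars[i + 1] == '\n' and stack:
--                     cover(stack.pop(), i + 2)
--             i += 2
--         elif chars[i] == '\n':
--             if stack:
--                 cover(stack.pop(), i + 1)
--             i += 1
--         else:
--             i += 1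
--
--     # single sweep: depth > 0 means the character is inside some comment
--     out = []
--     depth = 0
--     for k in range(n):
--         depth += diff[k]
--         out.append(chars[k] if chars[k] == '\n' or depth == 0 else ' ')
--     return ''.join(out)
-- ===== Notes on version B (the rewrite author's own statement) =====
-- stated objective: alternative
-- what changed: B replaces A's iterator/exception-driven scans and its repeated in-place fills of possibly nested, overlapping comment intervals by index-stepping guarded scans that mark each interval once in a coverage difference array and blank everything in a single final prefix-sum sweep.
-- outside the precondition, e.g. on find_comments('*)'): A raises IndexError, B returns '*)'; on find_comments('(*x'): A raises AssertionError, B returns '(*x'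
import Mathlib
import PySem

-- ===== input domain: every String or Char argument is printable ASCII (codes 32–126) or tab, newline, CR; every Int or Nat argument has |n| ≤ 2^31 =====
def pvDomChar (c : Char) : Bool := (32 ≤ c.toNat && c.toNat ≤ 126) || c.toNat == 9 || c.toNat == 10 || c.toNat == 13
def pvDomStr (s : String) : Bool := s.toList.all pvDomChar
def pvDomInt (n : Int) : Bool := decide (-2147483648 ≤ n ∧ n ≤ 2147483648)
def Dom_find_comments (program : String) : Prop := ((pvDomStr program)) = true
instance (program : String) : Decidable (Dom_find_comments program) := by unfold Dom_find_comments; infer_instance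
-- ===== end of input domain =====

-- B blanks comment characters by marking each comment interval in a coverage
-- difference array and doing one final sweep, instead of A's repeated in-place
-- fills of (possibly nested/overlapping) intervals; objective: alternative
-- (return-value equivalence; neither version mutates its argument).

-- ===== PORT A =====
-- Pass 1 of A: the while/next loop over enumerate(program) detecting (* ... *).
-- A's `line`/`column` counters only feed the text of the assert message and are
-- omitted; `none` is exactly where A raises (IndexError on popping an empty
-- stack, AssertionError on a non-empty stack at EOF).  Python's stack.append /
-- stack.pop() (push/pop at the same end) is modelled by cons / head; Python
-- appends each new pair at the end and the fill loop pops from the end, so the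
-- cons-built pairs list here is in exactly Python's pop (processing) order.
def pvA_scan1 : List Char → Nat → List Nat → List (Nat × Nat) → Option (List (Nat × Nat))
  | [], _, stack, pairs => if stack = [] then some pairs else none
  | c :: rest, i, stack, pairs =>
    if c = '\n' then pvA_scan1 rest (i + 1) stack pairs
    else if c = '(' then
      match rest with
      | [] => if stack = [] then some pairs else none        -- StopIteration → break → assert
      | c' :: rest' =>
        if c' = '*' then pvA_scan1 rest' (i + 2) (i :: stack) pairs
        else pvA_scan1 rest' (i + 2) stack pairs
    else if c = '*' then
      match rest with
      | [] => if stack = [] then some pairs else none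
      | c' :: rest' =>
        if c' = ')' then
          match stack with
          | [] => none                                       -- stack.pop() → IndexError
          | first :: stack' => pvA_scan1 rest' (i + 2) stack' ((first, i + 1) :: pairs)
        else pvA_scan1 rest' (i + 2) stack pairs
    else pvA_scan1 rest (i + 1) stack pairs

-- Pass 2 of A: the second while/next loop detecting -- ... newline (total).
def pvA_scan2 : List Char → Nat → List Nat → List (Nat × Nat) → List (Nat × Nat)
  | [], _, _, pairs => pairs
  | c :: rest, i, stack, pairs =>
    if c = '-' then
      match rest with
      | [] => pairs                                          -- StopIteration → break
      | c' :: rest' =>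
        if c' = '-' then pvA_scan2 rest' (i + 2) (i :: stack) pairs
        else if c' = '\n' then
          match stack with
          | [] => pvA_scan2 rest' (i + 2) [] pairs
          | first :: stack' => pvA_scan2 rest' (i + 2) stack' ((first, i + 1) :: pairs)
        else pvA_scan2 rest' (i + 2) stack pairs
    else if c = '\n' then
      match stack with
      | [] => pvA_scan2 rest (i + 1) [] pairs
      | first :: stack' => pvA_scan2 rest (i + 1) stack' ((first, i) :: pairs)
    else pvA_scan2 rest (i + 1) stack pairs

-- `for k in range(a, b+1): if not program[k] == '\n': program[k] = ' '`
-- (k is always in range when A reaches this loop; getD/set are exact there).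
def pvA_fillFrom (l : List Char) (k b : Nat) : List Char :=
  if _h : k ≤ b then
    pvA_fillFrom (if l.getD k ' ' = '\n' then l else l.set k ' ') (k + 1) b
  else l
termination_by b + 1 - k

def find_comments (program : String) : String :=
  match pvA_scan1 program.toList 0 [] [] with
  | none => program        -- A raises here; excluded by Pre_find_comments
  | some pairs =>
    let pairs := pvA_scan2 program.toList 0 [] pairs
    String.ofList (pairs.foldl (fun l p => pvA_fillFrom l p.1 p.2) program.toList)

-- ===== PORT B =====
-- cover(a, b): diff[a] += 1; diff[b] -= 1   (mark [a, b) as comment)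
def pvB_cover (diff : List Int) (a b : Nat) : List Int :=
  let d1 := diff.set a (diff.getD a 0 + 1)
  d1.set b (d1.getD b 0 - 1)

-- B's first while-loop: `while i < n` over chars[i], chars[i+1] — rendered as
-- recursion on the remaining characters (chars[i] is the head, chars[i+1] the
-- next element; `i + 1 < n` is the non-emptiness of the tail).
def pvB_scan1 : List Char → Nat → List Nat → List Int → List Int
  | [], _, _, diff => diff
  | c :: rest, i, stack, diff =>
    if c = '(' then
      match rest with
      | [] => diff
      | c' :: rest' =>
        if c' = '*' then pvB_scan1 rest' (i + 2) (i :: stack) diff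
        else pvB_scan1 rest' (i + 2) stack diff
    else if c = '*' then
      match rest with
      | [] => diff
      | c' :: rest' =>
        if c' = ')' then
          match stack with
          | [] => pvB_scan1 rest' (i + 2) [] diff
          | a :: stack' => pvB_scan1 rest' (i + 2) stack' (pvB_cover diff a (i + 2))
        else pvB_scan1 rest' (i + 2) stack diff
    else pvB_scan1 rest (i + 1) stack diff

-- B's second while-loop (-- comments), same rendering.
def pvB_scan2 : List Char → Nat → List Nat → List Int → List Int
  | [], _, _, diff => diff
  | c :: rest, i, stack, diff =>
    if c = '-' then
      match rest with
      | [] => diff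
      | c' :: rest' =>
        if c' = '-' then pvB_scan2 rest' (i + 2) (i :: stack) diff
        else if c' = '\n' then
          match stack with
          | [] => pvB_scan2 rest' (i + 2) [] diff
          | a :: stack' => pvB_scan2 rest' (i + 2) stack' (pvB_cover diff a (i + 2))
        else pvB_scan2 rest' (i + 2) stack diff
    else if c = '\n' then
      match stack with
      | [] => pvB_scan2 rest (i + 1) [] diff
      | a :: stack' => pvB_scan2 rest (i + 1) stack' (pvB_cover diff a (i + 1))
    else pvB_scan2 rest (i + 1) stack diff

-- B's final `for k in range(n)` sweep: walks chars and diff in step.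
def pvB_sweep : List Char → List Int → Int → List Char
  | [], _, _ => []
  | c :: rest, diff, depth =>
    let depth := depth + diff.headD 0
    (if c = '\n' ∨ depth = 0 then c else ' ') :: pvB_sweep rest diff.tail depth

def find_comments_alt (program : String) : String :=
  let chars := program.toList
  let diff := List.replicate (chars.length + 1) (0 : Int)
  let diff := pvB_scan1 chars 0 [] diff
  let diff := pvB_scan2 chars 0 [] diff
  String.ofList (pvB_sweep chars diff 0)

-- ===== PRECONDITION & SPEC =====
-- Pre_: the `(*`/`*)` delimiters of the program are balanced (the standard
-- matched-parentheses condition, read under Cool's two-character scan, in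
-- which e.g. the `(` of `((*` consumes the `*`).  `pvBalance` is the nesting
-- depth of that condition — like matched parentheses, balancedness has no
-- scan-free characterisation.  Pre_ holds exactly when A returns normally:
-- A raises IndexError on an unmatched `*)` (depth underflow) and
-- AssertionError ("EOF in comment") when the final depth is positive; it
-- excludes nothing on which A returns.
def pvBalance : List Char → Nat → Option Nat
  | [], d => some d
  | [_], d => some d
  | c :: c' :: rest, d =>
    if c = '(' then pvBalance rest (if c' = '*' then d + 1 else d)
    else if c = '*' then
      if c' = ')' then
        match d with
        | 0 => none
        | d' + 1 => pvBalance rest d'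
      else pvBalance rest d
    else pvBalance (c' :: rest) d

def Pre_find_comments (program : String) : Prop := pvBalance program.toList 0 = some 0
instance (program : String) : Decidable (Pre_find_comments program) := by
  unfold Pre_find_comments; infer_instance

def pvWitness_find_comments : String := "(* a (* b *) *)c--d\ne\n"

def Spec_find_comments (program : String) (out : String) : Prop := out = find_comments_alt program
instance (program : String) (out : String) : Decidable (Spec_find_comments program out) := by
  unfold Spec_find_comments; infer_instance

-- ===== CLAIM (what is proved, stated in full; the proofs are below) =====
def Claim_equal_find_comments : Prop := ∀ (program : String), Dom_find_comments program → Pre_find_comments program → Spec_find_comments program (find_comments program)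

-- ===== LEMMAS AND PROOFS =====

-- `pvBlank chars P`: chars with every non-newline position satisfying P blanked.
def pvBlank (chars : List Char) (P : Nat → Bool) : List Char :=
  chars.mapIdx (fun k c => if c ≠ '\n' ∧ P k then ' ' else c)

-- prefix sum of the first k cells of the difference array
def pvS (diff : List Int) (k : Nat) : Int := (diff.take k).sum

theorem pvBlank_length (chars : List Char) (P : Nat → Bool) :
    (pvBlank chars P).length = chars.length := by
  simp [pvBlank]

theorem pvBlank_getElem (chars : List Char) (P : Nat → Bool) (k : Nat) (hk : k < chars.length) :
    (pvBlank chars P)[k]'(by simpa [pvBlank] using hk) =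
      if chars[k] ≠ '\n' ∧ P k then ' ' else chars[k] := by
  simp [pvBlank]

theorem pvBlank_congr (chars : List Char) (P Q : Nat → Bool)
    (h : ∀ (k : Nat) (hk : k < chars.length), chars[k] ≠ '\n' → P k = Q k) :
    pvBlank chars P = pvBlank chars Q := by
  apply List.ext_getElem (by simp [pvBlank])
  intro k h1 h2
  simp only [pvBlank, List.getElem_mapIdx]
  by_cases hn : chars[k]'(by simpa [pvBlank] using h1) = '\n'
  · simp [hn]
  · rw [h k (by simpa [pvBlank] using h1) hn]

theorem pvBlank_false (chars : List Char) : pvBlank chars (fun _ => false) = chars := by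
  apply List.ext_getElem (by simp [pvBlank])
  intro k h1 h2
  simp [pvBlank]

theorem pvBlank_set (chars : List Char) (P : Nat → Bool) (a : Nat)
    (ha : a < chars.length) (hn : chars[a] ≠ '\n') :
    (pvBlank chars P).set a ' ' = pvBlank chars (fun k => P k || k == a) := by
  apply List.ext_getElem (by simp [pvBlank])
  intro k h1 h2
  rw [List.getElem_set]
  by_cases hk : a = k
  · subst hk
    simp only [pvBlank, List.getElem_mapIdx]
    simp [hn]
  · rw [if_neg hk]
    have hk2 : k < chars.length := by simpa [pvBlank] using h2
    rw [pvBlank_getElem chars P k hk2, pvBlank_getElem chars _ k hk2]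
    have : (k == a) = false := by simp; omega
    simp [this]

theorem pvA_fillFrom_blank_aux (chars : List Char) (b : Nat) (hb : b < chars.length) :
    ∀ (n a : Nat), b + 1 - a ≤ n → ∀ P : Nat → Bool,
      pvA_fillFrom (pvBlank chars P) a b =
        pvBlank chars (fun k => P k || (a ≤ k && k ≤ b)) := by
  intro n
  induction n with
  | zero =>
    intro a hn P
    rw [pvA_fillFrom, dif_neg (by omega)]
    apply pvBlank_congr
    intro k hk _
    have : ¬ (a ≤ k ∧ k ≤ b) := by omega
    by_cases h1 : a ≤ k <;> simp_all
  | succ n ih =>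
    intro a hn P
    by_cases hab : a ≤ b
    · have ha : a < chars.length := by omega
      rw [pvA_fillFrom, dif_pos hab]
      have hgd : (pvBlank chars P).getD a ' ' = (pvBlank chars P)[a]'(by simpa [pvBlank] using ha) :=
        List.getD_eq_getElem _ ' ' (by simpa [pvBlank] using ha)
      by_cases hna : chars[a] = '\n'
      · have : (pvBlank chars P).getD a ' ' = '\n' := by
          rw [hgd, pvBlank_getElem chars P a ha]; simp [hna]
        rw [if_pos this, ih (a + 1) (by omega) P]
        apply pvBlank_congr
        intro k hk hkn
        by_cases hk1 : k = a
        · subst hk1; exact absurd hna hkn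
        · by_cases h1 : a ≤ k
          · have h2 : a + 1 ≤ k := by omega
            simp [h1, h2]
          · have h2 : ¬ (a + 1 ≤ k) := by omega
            simp [h1, h2]
      · have : ¬ (pvBlank chars P).getD a ' ' = '\n' := by
          rw [hgd, pvBlank_getElem chars P a ha]
          by_cases hp : P a <;> simp [hna, hp]
        rw [if_neg this, pvBlank_set chars P a ha hna, ih (a + 1) (by omega) _]
        apply pvBlank_congr
        intro k hk _
        by_cases hk1 : k = a
        · subst hk1; simp [hab]
        · have e : (k == a) = false := by simp; omega
          by_cases h1 : a ≤ k
          · have h2 : a + 1 ≤ k := by omega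
            simp [e, h1, h2]
          · have h2 : ¬ (a + 1 ≤ k) := by omega
            simp [e, h1, h2]
    · rw [pvA_fillFrom, dif_neg hab]
      apply pvBlank_congr
      intro k hk _
      have : ¬ (a ≤ k ∧ k ≤ b) := by omega
      by_cases h1 : a ≤ k <;> simp_all

theorem pvA_fill_fold (chars : List Char) (L : List (Nat × Nat)) (P : Nat → Bool)
    (hL : ∀ p ∈ L, p.2 < chars.length) :
    L.foldl (fun l p => pvA_fillFrom l p.1 p.2) (pvBlank chars P) =
      pvBlank chars (fun k => P k || L.any (fun p => p.1 ≤ k && k ≤ p.2)) := by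
  induction L generalizing P with
  | nil => simp
  | cons p L ih =>
    rw [List.foldl_cons,
        pvA_fillFrom_blank_aux chars p.2 (hL p (by simp)) (p.2 + 1 - p.1) p.1 le_rfl P,
        ih _ (fun q hq => hL q (by simp [hq]))]
    apply pvBlank_congr
    intro k hk _
    simp [List.any_cons, Bool.or_assoc]

theorem pvS_set (l : List Int) (j k : Nat) (v : Int) (hj : j < l.length) :
    pvS (l.set j v) k = pvS l k + (if j < k then v - l[j] else 0) := by
  induction l generalizing j k with
  | nil => simp at hj
  | cons a l ih =>
    cases j with
    | zero =>
      cases k with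
      | zero => simp [pvS]
      | succ k => simp [pvS, List.take_succ_cons]; ring
    | succ j =>
      cases k with
      | zero => simp [pvS]
      | succ k =>
        simp only [List.set_cons_succ, pvS, List.take_succ_cons, List.sum_cons]
        have := ih j k (by simpa using hj)
        simp only [pvS] at this
        rw [this]
        simp
        ring

theorem pvS_replicate (n k : Nat) : pvS (List.replicate n (0 : Int)) k = 0 := by
  simp [pvS, List.take_replicate]

theorem pvS_cover (diff : List Int) (a b k : Nat) (hab : a < b) (hb : b < diff.length) :
    pvS (pvB_cover diff a b) k =
      pvS diff k + (if a < k then 1 else 0) - (if b < k then 1 else 0) := by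
  have ha : a < diff.length := lt_trans hab hb
  have hga : diff.getD a 0 = diff[a] := List.getD_eq_getElem diff 0 ha
  have hb1 : b < (diff.set a (diff.getD a 0 + 1)).length := by simpa using hb
  have hgb : (diff.set a (diff.getD a 0 + 1)).getD b 0 = diff[b] := by
    rw [List.getD_eq_getElem _ 0 hb1, List.getElem_set_ne (by omega)]
  simp only [pvB_cover]
  rw [pvS_set _ b k _ hb1, pvS_set _ a k _ ha]
  have e1 : diff.getD a 0 + 1 - diff[a] = 1 := by rw [hga]; ring
  have e2 : (diff.set a (diff.getD a 0 + 1)).getD b 0 - 1 -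
      (diff.set a (diff.getD a 0 + 1))[b]'hb1 = -1 := by
    rw [hgb, List.getElem_set_ne (by omega)]; ring
  rw [e1, e2]
  split_ifs <;> ring

theorem pvS_covers (Δ : List (Nat × Nat)) (diff : List Int) (m : Nat)
    (hΔ : ∀ p ∈ Δ, p.1 ≤ p.2 ∧ p.2 + 1 < diff.length) :
    pvS (Δ.foldr (fun p d => pvB_cover d p.1 (p.2 + 1)) diff) (m + 1) =
      pvS diff (m + 1) + (Δ.countP (fun p => p.1 ≤ m && m ≤ p.2) : Int) := by
  induction Δ with
  | nil => simp
  | cons p Δ ih =>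
    have hlen : (Δ.foldr (fun p d => pvB_cover d p.1 (p.2 + 1)) diff).length = diff.length := by
      clear ih hΔ
      induction Δ with
      | nil => rfl
      | cons q Δ ih2 =>
          simp only [List.foldr_cons, pvB_cover, List.length_set]
          exact ih2
    have hp := hΔ p (by simp)
    rw [List.foldr_cons, pvS_cover _ _ _ _ (by omega) (by rw [hlen]; omega),
        ih (fun q hq => hΔ q (by simp [hq]))]
    rw [List.countP_cons]
    by_cases h1 : p.1 ≤ m ∧ m ≤ p.2
    · have : (p.1 ≤ m && m ≤ p.2) = true := by simp [h1.1, h1.2]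
      rw [this]
      have c1 : p.1 < m + 1 := by omega
      have c2 : ¬ (p.2 + 1 < m + 1) := by omega
      simp [c1, c2]
      ring
    · have : (p.1 ≤ m && m ≤ p.2) = false := by
        simp only [Bool.and_eq_false_iff, decide_eq_false_iff_not]; omega
      rw [this]
      rcases Nat.lt_or_ge m p.1 with hm | hm
      · have c1 : ¬ p.1 < m + 1 := by omega
        have c2 : ¬ p.2 + 1 < m + 1 := by omega
        simp [c1, c2]
      · have hm2 : p.2 < m := by omega
        have c1 : p.1 < m + 1 := by omega
        have c2 : p.2 + 1 < m + 1 := by omega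
        simp [c1, c2]

theorem pvB_sweep_length (chars : List Char) (diff : List Int) (d : Int) :
    (pvB_sweep chars diff d).length = chars.length := by
  induction chars generalizing diff d with
  | nil => rfl
  | cons c rest ih => simp [pvB_sweep, ih]

theorem pvS_one (diff : List Int) : pvS diff 1 = diff.headD 0 := by
  cases diff <;> simp [pvS]

theorem pvS_succ_tail (diff : List Int) (k : Nat) :
    pvS diff (k + 2) = diff.headD 0 + pvS diff.tail (k + 1) := by
  cases diff <;> simp [pvS]

theorem pvB_sweep_getElem (chars : List Char) (diff : List Int) (d : Int) (k : Nat)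
    (hk : k < chars.length) :
    (pvB_sweep chars diff d)[k]'(by simpa [pvB_sweep_length] using hk) =
      if chars[k] = '\n' ∨ d + pvS diff (k + 1) = 0 then chars[k] else ' ' := by
  induction chars generalizing diff d k with
  | nil => simp at hk
  | cons c rest ih =>
    cases k with
    | zero => simp [pvB_sweep, pvS_one]
    | succ k =>
      simp only [pvB_sweep, List.getElem_cons_succ, List.getElem_cons_succ]
      rw [ih diff.tail (d + diff.headD 0) k (by simpa using hk), pvS_succ_tail]
      ring_nf

theorem pv_scan1_corr (rest : List Char) (i : Nat) (stack : List Nat)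
    (ps0 ps : List (Nat × Nat)) (h : pvA_scan1 rest i stack ps0 = some ps) :
    ∃ Δ, ps = Δ ++ ps0 ∧
      ∀ diff, pvB_scan1 rest i stack diff =
        Δ.foldr (fun p d => pvB_cover d p.1 (p.2 + 1)) diff := by
  fun_induction pvA_scan1 rest i stack ps0 generalizing ps with
  | case1 i pairs =>
    cases h
    exact ⟨[], by simp, fun diff => rfl⟩
  | case2 i stack pairs hne => exact absurd h (by simp)
  | case3 rest i stack pairs ih =>
    obtain ⟨Δ, h1, h2⟩ := ih ps h
    exact ⟨Δ, h1, fun diff => by rw [pvB_scan1.eq_def]; simp [h2 diff]⟩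
  | case4 i pairs h1 =>
    cases h
    exact ⟨[], by simp, fun diff => by rw [pvB_scan1.eq_def]; simp⟩
  | case5 i stack pairs hne h1 => exact absurd h (by simp)
  | case6 i stack pairs rest' hnl ih =>
    obtain ⟨Δ, h1, h2⟩ := ih ps h
    exact ⟨Δ, h1, fun diff => by rw [pvB_scan1.eq_def]; simp [h2 diff]⟩
  | case7 i stack pairs c' rest' hne hnl ih =>
    obtain ⟨Δ, h1, h2⟩ := ih ps h
    exact ⟨Δ, h1, fun diff => by rw [pvB_scan1.eq_def]; simp [hne, h2 diff]⟩
  | case8 i pairs h1 h2 =>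
    cases h
    exact ⟨[], by simp, fun diff => by rw [pvB_scan1.eq_def]; simp⟩
  | case9 i stack pairs hne h1 h2 => exact absurd h (by simp)
  | case10 i pairs rest' h1 h2 => exact absurd h (by simp)
  | case11 i pairs rest' first stack' h1 h2 ih =>
    obtain ⟨Δ, h1', h2'⟩ := ih ps h
    refine ⟨Δ ++ [(first, i + 1)], by simp [h1'], fun diff => ?_⟩
    rw [List.foldr_append]
    rw [pvB_scan1.eq_def]; simp [h2']
  | case12 i stack pairs c' rest' hne h1 h2 ih =>
    obtain ⟨Δ, h1, h2⟩ := ih ps h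
    exact ⟨Δ, h1, fun diff => by rw [pvB_scan1.eq_def]; simp [hne, h2 diff]⟩
  | case13 c rest i stack pairs hn1 hn2 hn3 ih =>
    obtain ⟨Δ, h1, h2⟩ := ih ps h
    exact ⟨Δ, h1, fun diff => by rw [pvB_scan1.eq_def]; simp [hn2, hn3, h2 diff]⟩

theorem pv_scan2_corr (rest : List Char) (i : Nat) (stack : List Nat)
    (ps0 : List (Nat × Nat)) :
    ∃ Δ, pvA_scan2 rest i stack ps0 = Δ ++ ps0 ∧
      ∀ diff, pvB_scan2 rest i stack diff =
        Δ.foldr (fun p d => pvB_cover d p.1 (p.2 + 1)) diff := by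
  fun_induction pvA_scan2 rest i stack ps0 with
  | case1 i stack pairs => exact ⟨[], rfl, fun diff => rfl⟩
  | case2 i stack pairs => exact ⟨[], rfl, fun diff => by rw [pvB_scan2.eq_def]; simp⟩
  | case3 i stack pairs rest' ih =>
    obtain ⟨Δ, h1', h2⟩ := ih
    exact ⟨Δ, h1', fun diff => by rw [pvB_scan2.eq_def]; simp [h2 diff]⟩
  | case4 i pairs rest' h1 ih =>
    obtain ⟨Δ, h1', h2⟩ := ih
    exact ⟨Δ, h1', fun diff => by rw [pvB_scan2.eq_def]; simp [h2 diff]⟩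
  | case5 i pairs rest' first stack' h1 ih =>
    obtain ⟨Δ, h1', h2⟩ := ih
    refine ⟨Δ ++ [(first, i + 1)], by simp [h1'], fun diff => ?_⟩
    rw [List.foldr_append, pvB_scan2.eq_def]
    simp [h2]
  | case6 i stack pairs c' rest' hne1 hne2 ih =>
    obtain ⟨Δ, h1', h2⟩ := ih
    exact ⟨Δ, h1', fun diff => by rw [pvB_scan2.eq_def]; simp [hne1, hne2, h2 diff]⟩
  | case7 rest i pairs hne ih =>
    obtain ⟨Δ, h1', h2⟩ := ih
    exact ⟨Δ, h1', fun diff => by rw [pvB_scan2.eq_def]; simp [hne, h2 diff]⟩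
  | case8 rest i pairs first stack' hne ih =>
    obtain ⟨Δ, h1', h2⟩ := ih
    refine ⟨Δ ++ [(first, i)], by simp [h1'], fun diff => ?_⟩
    rw [List.foldr_append, pvB_scan2.eq_def]
    simp [hne, h2]
  | case9 c rest i stack pairs hne1 hne2 ih =>
    obtain ⟨Δ, h1', h2⟩ := ih
    exact ⟨Δ, h1', fun diff => by rw [pvB_scan2.eq_def]; simp [hne1, hne2, h2 diff]⟩

theorem pv_scan1_bounds (rest : List Char) (i : Nat) (stack : List Nat)
    (ps0 ps : List (Nat × Nat)) (h : pvA_scan1 rest i stack ps0 = some ps)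
    (hs : ∀ s ∈ stack, s < i) :
    ∀ p ∈ ps, p ∈ ps0 ∨ (p.1 ≤ p.2 ∧ p.2 < i + rest.length) := by
  fun_induction pvA_scan1 rest i stack ps0 generalizing ps with
  | case1 i pairs => cases h; exact fun p hp => Or.inl hp
  | case2 i stack pairs hne => exact absurd h (by simp)
  | case3 rest i stack pairs ih =>
    intro p hp
    rcases ih ps h (fun s hss => by have := hs s hss; omega) p hp with h1 | h1
    · exact Or.inl h1
    · right; simpa using by omega
  | case4 i pairs h1 => cases h; exact fun p hp => Or.inl hp
  | case5 i stack pairs hne h1 => exact absurd h (by simp)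
  | case6 i stack pairs rest' hnl ih =>
    intro p hp
    have hs' : ∀ s ∈ (i :: stack), s < i + 2 := by
      intro s hss
      rcases List.mem_cons.1 hss with h1 | h1
      · omega
      · have := hs s h1; omega
    rcases ih ps h hs' p hp with h1 | h1
    · exact Or.inl h1
    · right; simp only [List.length_cons] at *; omega
  | case7 i stack pairs c' rest' hne hnl ih =>
    intro p hp
    rcases ih ps h (fun s hss => by have := hs s hss; omega) p hp with h1 | h1
    · exact Or.inl h1
    · right; simp only [List.length_cons] at *; omega
  | case8 i pairs h1 h2 => cases h; exact fun p hp => Or.inl hp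
  | case9 i stack pairs hne h1 h2 => exact absurd h (by simp)
  | case10 i pairs rest' h1 h2 => exact absurd h (by simp)
  | case11 i pairs rest' first stack' h1 h2 ih =>
    intro p hp
    have hf : first < i := hs first (by simp)
    have hs' : ∀ s ∈ stack', s < i + 2 := by
      intro s hss; have := hs s (by simp [hss]); omega
    rcases ih ps h hs' p hp with h1' | h1'
    · rcases List.mem_cons.1 h1' with h2' | h2'
      · right; subst h2'; simp only [List.length_cons] at *; omega
      · exact Or.inl h2'
    · right; simp only [List.length_cons] at *; omega
  | case12 i stack pairs c' rest' hne h1 h2 ih =>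
    intro p hp
    rcases ih ps h (fun s hss => by have := hs s hss; omega) p hp with h1' | h1'
    · exact Or.inl h1'
    · right; simp only [List.length_cons] at *; omega
  | case13 c rest i stack pairs hn1 hn2 hn3 ih =>
    intro p hp
    rcases ih ps h (fun s hss => by have := hs s hss; omega) p hp with h1' | h1'
    · exact Or.inl h1'
    · right; simp only [List.length_cons] at *; omega

theorem pv_scan2_bounds (rest : List Char) (i : Nat) (stack : List Nat)
    (ps0 : List (Nat × Nat)) (hs : ∀ s ∈ stack, s < i) :
    ∀ p ∈ pvA_scan2 rest i stack ps0, p ∈ ps0 ∨ (p.1 ≤ p.2 ∧ p.2 < i + rest.length) := by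
  fun_induction pvA_scan2 rest i stack ps0 with
  | case1 i stack pairs => exact fun p hp => Or.inl hp
  | case2 i stack pairs => exact fun p hp => Or.inl hp
  | case3 i stack pairs rest' ih =>
    intro p hp
    have hs' : ∀ s ∈ (i :: stack), s < i + 2 := by
      intro s hss
      rcases List.mem_cons.1 hss with h1 | h1
      · omega
      · have := hs s h1; omega
    rcases ih hs' p hp with h1 | h1
    · exact Or.inl h1
    · right; simp only [List.length_cons] at *; omega
  | case4 i pairs rest' h1 ih =>
    intro p hp
    rcases ih (by simp) p hp with h1' | h1'
    · exact Or.inl h1'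
    · right; simp only [List.length_cons] at *; omega
  | case5 i pairs rest' first stack' h1 ih =>
    intro p hp
    have hf : first < i := hs first (by simp)
    have hs' : ∀ s ∈ stack', s < i + 2 := by
      intro s hss; have := hs s (by simp [hss]); omega
    rcases ih hs' p hp with h1' | h1'
    · rcases List.mem_cons.1 h1' with h2' | h2'
      · right; subst h2'; simp only [List.length_cons] at *; omega
      · exact Or.inl h2'
    · right; simp only [List.length_cons] at *; omega
  | case6 i stack pairs c' rest' hne1 hne2 ih =>
    intro p hp
    rcases ih (fun s hss => by have := hs s hss; omega) p hp with h1' | h1'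
    · exact Or.inl h1'
    · right; simp only [List.length_cons] at *; omega
  | case7 rest i pairs hne ih =>
    intro p hp
    rcases ih (by simp) p hp with h1' | h1'
    · exact Or.inl h1'
    · right; simp only [List.length_cons] at *; omega
  | case8 rest i pairs first stack' hne ih =>
    intro p hp
    have hf : first < i := hs first (by simp)
    have hs' : ∀ s ∈ stack', s < i + 1 := by
      intro s hss; have := hs s (by simp [hss]); omega
    rcases ih hs' p hp with h1' | h1'
    · rcases List.mem_cons.1 h1' with h2' | h2'
      · right; subst h2'; simp only [List.length_cons] at *; omega
      · exact Or.inl h2'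
    · right; simp only [List.length_cons] at *; omega
  | case9 c rest i stack pairs hne1 hne2 ih =>
    intro p hp
    rcases ih (fun s hss => by have := hs s hss; omega) p hp with h1' | h1'
    · exact Or.inl h1'
    · right; simp only [List.length_cons] at *; omega

theorem pv_pre_scan1 (rest : List Char) (d : Nat) (h : pvBalance rest d = some 0) :
    ∀ (i : Nat) (stack : List Nat) (ps0 : List (Nat × Nat)), stack.length = d →
      ∃ ps, pvA_scan1 rest i stack ps0 = some ps := by
  fun_induction pvBalance rest d with
  | case1 d =>
    intro i stack ps0 hlen
    have : stack = [] := by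
      cases stack with
      | nil => rfl
      | cons a t => simp at hlen h; omega
    subst this
    exact ⟨ps0, by rw [pvA_scan1.eq_def]; simp⟩
  | case2 c d =>
    intro i stack ps0 hlen
    have hst : stack = [] := by
      cases stack with
      | nil => rfl
      | cons a t => simp at hlen h; omega
    subst hst
    by_cases h1 : c = '\n'
    · subst h1
      exact ⟨ps0, by rw [pvA_scan1.eq_def]; simp [pvA_scan1]⟩
    · by_cases h2 : c = '('
      · subst h2
        exact ⟨ps0, by rw [pvA_scan1.eq_def]; simp⟩
      · by_cases h3 : c = '*'
        · subst h3
          exact ⟨ps0, by rw [pvA_scan1.eq_def]; simp⟩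
        · exact ⟨ps0, by rw [pvA_scan1.eq_def]; simp [h1, h2, h3, pvA_scan1]⟩
  | case3 c' rest d ih =>
    intro i stack ps0 hlen
    by_cases hc' : c' = '*'
    · subst hc'
      obtain ⟨ps, hps⟩ := ih h (i + 2) (i :: stack) ps0 (by simp [hlen])
      exact ⟨ps, by rw [pvA_scan1.eq_def]; simpa using hps⟩
    · obtain ⟨ps, hps⟩ := ih h (i + 2) stack ps0 (by simp [hlen, hc'])
      exact ⟨ps, by rw [pvA_scan1.eq_def]; simp [hc']; simpa using hps⟩
  | case4 rest hc1 =>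
    -- unmatched *) at depth 0: pvBalance = none, contradiction
    simp at h
  | case5 rest d' hc1 ih =>
    intro i stack ps0 hlen
    cases stack with
    | nil => simp at hlen
    | cons first stack' =>
      obtain ⟨ps, hps⟩ := ih h (i + 2) stack' ((first, i + 1) :: ps0) (by simpa using hlen)
      exact ⟨ps, by rw [pvA_scan1.eq_def]; simp [hc1]; simpa using hps⟩
  | case6 c' rest d hne hc1 ih =>
    intro i stack ps0 hlen
    obtain ⟨ps, hps⟩ := ih h (i + 2) stack ps0 hlen
    exact ⟨ps, by rw [pvA_scan1.eq_def]; simp [hne]; simpa using hps⟩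
  | case7 c c' rest d hc1 hc2 ih =>
    intro i stack ps0 hlen
    obtain ⟨ps, hps⟩ := ih h (i + 1) stack ps0 hlen
    by_cases h1 : c = '\n'
    · subst h1
      exact ⟨ps, by rw [pvA_scan1.eq_def]; simpa using hps⟩
    · exact ⟨ps, by rw [pvA_scan1.eq_def]; simp [h1, hc1, hc2]; simpa using hps⟩

-- ===== VERDICT (by name: the statement is the Claim_ definition above) =====
theorem find_comments_spec : Claim_equal_find_comments := by
  intro program _hdom hpre
  unfold Spec_find_comments
  set chars := program.toList with hchars
  have hpre' : pvBalance chars 0 = some 0 := hpre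
  obtain ⟨ps1, hps1⟩ := pv_pre_scan1 chars 0 hpre' 0 [] [] rfl
  obtain ⟨Δ1, hΔ1, hB1⟩ := pv_scan1_corr chars 0 [] [] ps1 hps1
  obtain ⟨Δ2, hΔ2, hB2⟩ := pv_scan2_corr chars 0 [] ps1
  set L := pvA_scan2 chars 0 [] ps1 with hL
  have hLval : L = Δ2 ++ Δ1 := by rw [hΔ2, hΔ1]; simp
  -- bounds on every produced pair
  have hb1 : ∀ p ∈ ps1, p.1 ≤ p.2 ∧ p.2 < chars.length := by
    intro p hp
    rcases pv_scan1_bounds chars 0 [] [] ps1 hps1 (by simp) p hp with h | h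
    · simp at h
    · simpa using h
  have hbL : ∀ p ∈ L, p.1 ≤ p.2 ∧ p.2 < chars.length := by
    intro p hp
    rcases pv_scan2_bounds chars 0 [] ps1 (by simp) p hp with h | h
    · exact hb1 p h
    · simpa using h
  -- A's value
  have hA : find_comments program =
      String.ofList (pvBlank chars (fun k => L.any (fun p => p.1 ≤ k && k ≤ p.2))) := by
    rw [find_comments, ← hchars, hps1]
    show String.ofList (List.foldl (fun l p => pvA_fillFrom l p.1 p.2) chars (pvA_scan2 chars 0 [] ps1)) = _
    have : L.foldl (fun l p => pvA_fillFrom l p.1 p.2) chars =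
        pvBlank chars (fun k => L.any (fun p => p.1 ≤ k && k ≤ p.2)) := by
      conv_lhs => rw [← pvBlank_false chars]
      rw [pvA_fill_fold chars L _ (fun p hp => (hbL p hp).2)]
      simp
    rw [← hL, this]
  -- B's value
  have hB : find_comments_alt program =
      String.ofList (pvB_sweep chars
        (L.foldr (fun p d => pvB_cover d p.1 (p.2 + 1))
          (List.replicate (chars.length + 1) (0 : Int))) 0) := by
    rw [find_comments_alt]
    simp only [← hchars]
    rw [hB1, hB2, ← List.foldr_append, ← hLval]
  rw [hA, hB]
  -- pointwise equality of the two character lists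
  congr 1
  apply List.ext_getElem (by rw [pvBlank_length, pvB_sweep_length])
  intro k h1 h2
  have hk : k < chars.length := by simpa [pvBlank_length] using h1
  rw [pvBlank_getElem chars _ k hk, pvB_sweep_getElem chars _ 0 k hk]
  have hdlen : (List.replicate (chars.length + 1) (0 : Int)).length = chars.length + 1 := by
    simp
  have hS := pvS_covers L (List.replicate (chars.length + 1) (0 : Int)) k
    (fun p hp => ⟨(hbL p hp).1, by rw [hdlen]; have := (hbL p hp).2; omega⟩)
  rw [pvS_replicate] at hS
  rw [hS]
  simp only [zero_add]
  by_cases hn : chars[k] = '\n'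
  · simp [hn]
  · by_cases hany : L.any (fun p => p.1 ≤ k && k ≤ p.2)
    · have hc : L.countP (fun p => p.1 ≤ k && k ≤ p.2) ≠ 0 := by
        rw [Ne, List.countP_eq_zero]
        obtain ⟨p, hp, hpk⟩ := List.any_eq_true.1 hany
        exact fun hall => hall p hp hpk
      obtain ⟨p, hp, hpk⟩ := List.any_eq_true.1 hany
      simp only [Bool.and_eq_true, decide_eq_true_eq] at hpk
      simp [hn, hany]
      intro hall
      have := hall p.1 p.2 (by simpa using hp) hpk.1
      omega
    · have hc : L.countP (fun p => p.1 ≤ k && k ≤ p.2) = 0 := by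
        rw [List.countP_eq_zero]
        intro p hp hpk
        exact hany (List.any_eq_true.2 ⟨p, hp, hpk⟩)
      simp [hn, hany, hc]
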